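-- pv_equiv track=rewrite | github.com/MatheusMuriel/Labirintite | Main.py | criarGrade
-- ===== SOURCE A (Python) =====
-- TILE_CHAO = 0
--
-- TILE_EXT_MID = 1
--
-- TILE_EXT_LAT_MID_D = 2
--
-- TILE_EXT_LAT_MID_E = 3
--
-- TILE_EXT_LAT_INF_E = 8
--
-- TILE_EXT_LAT_INF_D = 9
--
-- TILE_PAREDE_INTERNA = 123
--
-- def criarGrade(largura, altura):
--     grade = []
--     for linha in range(altura):
--         grade.append([])
--         for coluna in range(largura):
--             if ((coluna % 2) == 1) and ((linha % 2) == 1):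
--                 grade[linha].append(TILE_CHAO)
--             elif (coluna == 0 ):
--                 # Condição verdadeira se for a primeira coluna
--                 if linha == 0:
--                     grade[linha].append(TILE_EXT_LAT_INF_E)
--                 else:
--                     grade[linha].append(TILE_EXT_LAT_MID_D)
--             elif (coluna.__index__() == (largura - 1)):
--                 # Condição verdadeira se for a ultima coluna
--                 if linha == 0:
--                     grade[linha].append(TILE_EXT_LAT_INF_D)
--                 else:
--                     grade[linha].append(TILE_EXT_LAT_MID_E)
--             elif (linha == 0):
--                 # Condição verdadeira se for a primeira linha
--                 if len(grade[linha]) > 0: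
--                     grade[linha].append(TILE_EXT_MID)
--             elif (linha.__index__() == (altura-1)):
--                 # Ultima linha
--                 if len(grade[linha]) > 0:
--                     grade[linha].append(TILE_EXT_MID)
--
--             elif (coluna == largura - 1) or (linha == altura - 1):
--                 grade[linha].append(TILE_PAREDE_INTERNA)
--             else:
--                 grade[linha].append(TILE_PAREDE_INTERNA)
--
--     return grade
-- ===== SOURCE B (Python) =====
-- TILE_CHAO = 0
--
-- TILE_EXT_MID = 1
--
-- TILE_EXT_LAT_MID_D = 2
--
-- TILE_EXT_LAT_MID_E = 3
--
-- TILE_EXT_LAT_INF_E = 8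
--
-- TILE_EXT_LAT_INF_D = 9
--
-- TILE_PAREDE_INTERNA = 123
--
-- def criarGrade(largura, altura):
--     # Init-then-carve, row-wise: fill each row with its base tile, stamp the
--     # side borders, then carve the floor cells over odd columns of odd rows.
--     grade = []
--     for linha in range(altura):
--         base = TILE_EXT_MID if (linha == 0 or linha == altura - 1) else TILE_PAREDE_INTERNA
--         row = [base] * largura
--         if largura > 0:
--             row[largura - 1] = TILE_EXT_LAT_INF_D if linha == 0 else TILE_EXT_LAT_MID_E
--             row[0] = TILE_EXT_LAT_INF_E if linha == 0 else TILE_EXT_LAT_MID_D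
--         if linha % 2 == 1:
--             row[1::2] = [TILE_CHAO] * (largura // 2)
--         grade.append(row)
--     return grade
-- ===== Notes on version B (the rewrite author's own statement) =====
-- stated objective: simpler
-- what changed: A decides every cell with a six-way per-cell branch chain appended one element at a time; B builds each row by init-then-carve: fill the whole row with its base tile via list multiplication, stamp the two side borders, then overwrite the odd columns of odd rows with the floor tile through one slice assignment.
import Mathlib
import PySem

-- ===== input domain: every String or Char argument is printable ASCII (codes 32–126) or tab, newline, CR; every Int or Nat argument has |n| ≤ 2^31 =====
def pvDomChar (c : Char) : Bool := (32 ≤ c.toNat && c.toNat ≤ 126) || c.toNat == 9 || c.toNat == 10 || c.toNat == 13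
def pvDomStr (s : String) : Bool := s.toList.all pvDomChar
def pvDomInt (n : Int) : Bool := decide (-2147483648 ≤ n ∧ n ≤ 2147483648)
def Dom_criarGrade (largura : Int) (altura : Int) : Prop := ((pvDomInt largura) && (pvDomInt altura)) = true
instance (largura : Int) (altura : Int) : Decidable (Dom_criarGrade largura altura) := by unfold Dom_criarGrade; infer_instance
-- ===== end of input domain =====

-- B builds each row by init-then-carve (fill, stamp borders, carve odd cells) instead of A's per-cell branch chain; objective: simpler.


-- ===== PORT A =====
-- one step of A's inner loop over `coluna` (the branch chain, in A's order, incl. the len>0 guards)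
def stepA (largura : Int) (altura : Int) (linha : Int) (row : List Int) (coluna : Int) : List Int :=
  if PySem.Int.mod coluna 2 = 1 ∧ PySem.Int.mod linha 2 = 1 then row ++ [0]
  else if coluna = 0 then (if linha = 0 then row ++ [8] else row ++ [2])
  else if coluna = largura - 1 then (if linha = 0 then row ++ [9] else row ++ [3])
  else if linha = 0 then (if row.length > 0 then row ++ [1] else row)
  else if linha = altura - 1 then (if row.length > 0 then row ++ [1] else row)
  else if coluna = largura - 1 ∨ linha = altura - 1 then row ++ [123]
  else row ++ [123]

def criarGrade (largura : Int) (altura : Int) : List (List Int) :=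
  (PySem.List.pyRange 0 altura 1).foldl
    (fun grade linha =>
      grade ++ [(PySem.List.pyRange 0 largura 1).foldl (stepA largura altura linha) []])
    []

-- ===== PORT B =====
-- one row of B: fill with the base tile, stamp the two side borders, carve odd columns of odd rows
def rowB (largura : Int) (altura : Int) (linha : Int) : List Int :=
  let base : Int := if linha = 0 ∨ linha = altura - 1 then 1 else 123
  let row := List.replicate largura.toNat base            -- [base] * largura  (negative largura → [])
  let row := if largura > 0 then
      (row.set (largura - 1).toNat (if linha = 0 then 9 else 3)).set 0 (if linha = 0 then 8 else 2)
    else row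
  if PySem.Int.mod linha 2 = 1 then
    -- row[1::2] = [TILE_CHAO] * (largura // 2): zero every odd index (RHS length = slice length)
    row.mapIdx (fun i x => if i % 2 = 1 then 0 else x)
  else row

def criarGrade_alt (largura : Int) (altura : Int) : List (List Int) :=
  (PySem.List.pyRange 0 altura 1).foldl
    (fun grade linha => grade ++ [rowB largura altura linha]) []

-- ===== PRECONDITION & SPEC =====
def Spec_criarGrade (largura : Int) (altura : Int) (out : List (List Int)) : Prop := out = criarGrade_alt largura altura
instance (largura : Int) (altura : Int) (out : List (List Int)) : Decidable (Spec_criarGrade largura altura out) := by unfold Spec_criarGrade; infer_instance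

-- ===== CLAIM (what is proved, stated in full; the proofs are below) =====
def Claim_equal_criarGrade : Prop := ∀ (largura : Int) (altura : Int), Dom_criarGrade largura altura → Spec_criarGrade largura altura (criarGrade largura altura)

-- ===== LEMMAS AND PROOFS =====

-- the value A's branch chain puts at column `coluna` (once the row is known nonempty)
def cellA (largura : Int) (altura : Int) (linha : Int) (coluna : Int) : Int :=
  if PySem.Int.mod coluna 2 = 1 ∧ PySem.Int.mod linha 2 = 1 then 0
  else if coluna = 0 then (if linha = 0 then 8 else 2)
  else if coluna = largura - 1 then (if linha = 0 then 9 else 3)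
  else if linha = 0 then 1
  else if linha = altura - 1 then 1
  else 123

lemma stepA_eq_append (largura altura linha : Int) (row : List Int) (coluna : Int)
    (h : row ≠ []) :
    stepA largura altura linha row coluna = row ++ [cellA largura altura linha coluna] := by
  have hl : row.length > 0 := List.length_pos_iff.mpr h
  unfold stepA cellA
  split_ifs <;> simp_all

lemma foldl_stepA_eq_map (largura altura linha : Int) :
    ∀ (l : List Int) (acc : List Int), acc ≠ [] →
      l.foldl (stepA largura altura linha) acc = acc ++ l.map (cellA largura altura linha) := by
  intro l
  induction l with
  | nil => intro acc _; simp
  | cons x xs ih =>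
    intro acc hacc
    simp only [List.foldl_cons, List.map_cons]
    rw [stepA_eq_append largura altura linha acc x hacc,
        ih (acc ++ [cellA largura altura linha x]) (by simp)]
    simp

lemma rowA_eq_map (largura altura linha : Int) :
    (PySem.List.pyRange 0 largura 1).foldl (stepA largura altura linha) []
      = (PySem.List.pyRange 0 largura 1).map (cellA largura altura linha) := by
  rcases (by omega : largura ≤ 0 ∨ 0 < largura) with h | h
  · rw [PySem.List.pyRange_one_eq_nil h]; simp
  · rw [PySem.List.pyRange_one_cons h]
    simp only [List.foldl_cons, List.map_cons]
    have h0 : stepA largura altura linha [] 0 = [cellA largura altura linha 0] := by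
      have hm : PySem.Int.mod (0:Int) 2 = 0 := by decide
      unfold stepA cellA
      rw [hm]
      norm_num
      split_ifs <;> rfl
    rw [h0, foldl_stepA_eq_map largura altura linha _ _ (by simp)]
    simp

lemma mod_two_cast (j : Nat) : PySem.Int.mod (j : Int) 2 = ((j % 2 : Nat) : Int) := by
  have := PySem.Int.mod_natCast j 2
  exact_mod_cast this

lemma replicate_eq_map_range (n : Nat) (a : Int) :
    List.replicate n a = (List.range n).map (fun _ => a) := by
  simp

lemma set_map_range (n i : Nat) (f : Nat → Int) (v : Int) :
    ((List.range n).map f).set i v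
      = (List.range n).map (fun k => if k = i then v else f k) := by
  apply List.ext_getElem
  · simp
  · intro k h1 h2
    simp only [List.getElem_set, List.getElem_map, List.getElem_range]
    rcases eq_or_ne i k with he | hne
    · simp [he]
    · rw [if_neg hne, if_neg (Ne.symm hne)]

lemma mapIdx_map_range (n : Nat) (f : Nat → Int) (g : Nat → Int → Int) :
    ((List.range n).map f).mapIdx g = (List.range n).map (fun k => g k (f k)) := by
  apply List.ext_getElem
  · simp
  · intro k h1 h2
    simp [List.getElem_mapIdx]

lemma row_eq (largura altura linha : Int) (hl : 0 ≤ linha) :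
    (PySem.List.pyRange 0 largura 1).map (cellA largura altura linha)
      = rowB largura altura linha := by
  have hmodl : PySem.Int.mod linha 2 = linha % 2 :=
    PySem.Int.mod_eq_emod_of_pos (by norm_num)
  rcases (by omega : largura ≤ 0 ∨ 0 < largura) with h | h
  · rw [PySem.List.pyRange_one_eq_nil h]
    unfold rowB
    have h0 : largura.toNat = 0 := by omega
    simp [h0]
  · have hrows : rowB largura altura linha
        = (List.range largura.toNat).map (fun k =>
            if linha % 2 = 1 ∧ k % 2 = 1 then (0:Int)
            else if k = 0 then (if linha = 0 then 8 else 2)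
            else if k = (largura - 1).toNat then (if linha = 0 then 9 else 3)
            else (if linha = 0 ∨ linha = altura - 1 then 1 else 123)) := by
      unfold rowB
      simp only [if_pos h, hmodl]
      rw [replicate_eq_map_range, set_map_range, set_map_range]
      by_cases hodd : linha % 2 = 1
      · rw [if_pos hodd, mapIdx_map_range]
        apply List.map_congr_left
        intro k _
        by_cases hk : k % 2 = 1 <;> simp [hk, hodd]
      · rw [if_neg hodd]
        apply List.map_congr_left
        intro k _
        simp [hodd]
    rw [hrows, PySem.List.pyRange_one]
    simp only [List.map_map, sub_zero]
    apply List.map_congr_left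
    intro k hk
    have hkw : k < largura.toNat := List.mem_range.mp hk
    unfold cellA
    simp only [Function.comp_apply, zero_add]
    rw [mod_two_cast k]
    simp only [hmodl]
    split_ifs <;> omega

-- ===== VERDICT (by name: the statement is the Claim_ definition above) =====
theorem criarGrade_spec : Claim_equal_criarGrade := by
  intro largura altura _
  unfold Spec_criarGrade criarGrade criarGrade_alt
  rw [PySem.List.foldl_append_singleton_eq_map, PySem.List.foldl_append_singleton_eq_map]
  simp only [List.nil_append]
  apply List.map_congr_left
  intro linha hlin
  have h0 : 0 ≤ linha := (PySem.List.mem_pyRange_one.mp hlin).1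
  rw [rowA_eq_map, row_eq largura altura linha h0]
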